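-- pv_equiv track=rewrite | github.com/Ragnoji/workmate_test | main.py | split_parameters
-- ===== SOURCE A (Python) =====
-- def split_parameters(expression: str, operators: dict) -> tuple:
--     operator = None
--     parameters = [[]]
--     for ch in expression:
--         if ch in operators:
--             parameters.append([])
--             operator = ch
--             continue
--         parameters[-1].append(ch)
--     parameters = [''.join(p) for p in parameters]
--     column, value = parameters
--     return operator, column, value
-- ===== SOURCE B (Python) =====
-- def split_parameters(expression: str, operators: dict) -> tuple:
--     positions = [i for i, ch in enumerate(expression) if ch in operators]
--     i, = positions
--     return expression[i], expression[:i], expression[i + 1:]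
-- ===== Notes on version B (the rewrite author's own statement) =====
-- stated objective: simpler
-- what changed: B replaces A's per-character list-of-lists accumulation (append-to-last-bucket loop plus join) by an index table of operator positions, a single-element unpack, and two slices.
import Mathlib
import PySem

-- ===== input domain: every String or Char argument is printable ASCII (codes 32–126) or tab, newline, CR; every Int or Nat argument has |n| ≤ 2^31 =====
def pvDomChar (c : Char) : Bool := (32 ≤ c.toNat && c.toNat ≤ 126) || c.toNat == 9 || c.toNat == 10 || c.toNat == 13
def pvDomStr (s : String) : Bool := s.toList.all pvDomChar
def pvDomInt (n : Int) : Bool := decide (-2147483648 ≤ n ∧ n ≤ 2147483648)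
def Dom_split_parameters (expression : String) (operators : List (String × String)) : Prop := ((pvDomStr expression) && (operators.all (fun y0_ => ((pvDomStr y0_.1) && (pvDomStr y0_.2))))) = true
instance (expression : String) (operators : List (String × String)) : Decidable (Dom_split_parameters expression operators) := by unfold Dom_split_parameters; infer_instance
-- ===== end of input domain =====

-- B replaces A's per-character bucket accumulation by an operator-position index table plus two slices (objective: simpler).
-- Pre_ excludes inputs with operator-char count ≠ 1, on which both Pythons raise ValueError.


-- ===== PORT A =====
-- literal port of A: fold over the characters keeping (operator, parameters);
-- 'ch in operators' is key membership; the final two-element unpack raises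
-- ValueError when parameters has ≠ 2 buckets (excluded by Pre_; junk value there).
def split_parameters (expression : String) (operators : List (String × String)) : Option String × String × String :=
  let st := expression.toList.foldl
    (fun (st : Option String × List (List Char)) ch =>
      if operators.any (fun kv => kv.1 == String.ofList [ch]) then
        (some (String.ofList [ch]), st.2 ++ [[]])
      else
        (st.1, st.2.dropLast ++ [st.2.getLastD [] ++ [ch]]))
    (none, [[]])
  match st.2.map (fun p => String.ofList p) with
  | [column, value] => (st.1, column, value)
  | _ => (st.1, "", "")  -- Python: ValueError (unpack); outside Pre_

-- ===== PORT B =====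
-- literal port of B: index table of operator positions, single-element unpack, slices.
def split_parameters_alt (expression : String) (operators : List (String × String)) : Option String × String × String :=
  let L := expression.toList
  let positions := ((PySem.List.enumerate L 0).filter
      (fun p => operators.any (fun kv => kv.1 == String.ofList [p.2]))).map Prod.fst
  if positions.length = 1 then
    let i := positions.headD 0
    ((PySem.List.pyGet? L i).map (fun c => String.ofList [c]),
     String.ofList (PySem.List.slice L none (some i)),
     String.ofList (PySem.List.slice L (some (i + 1)) none))
  else (none, "", "")  -- Python: ValueError (unpack); outside Pre_

-- ===== PRECONDITION & SPEC =====
-- Both Pythons raise ValueError (tuple unpack) unless expression contains exactly one operator character.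
def Pre_split_parameters (expression : String) (operators : List (String × String)) : Prop :=
  expression.toList.countP (fun ch => operators.any (fun kv => kv.1 == String.ofList [ch])) = 1
instance (expression : String) (operators : List (String × String)) : Decidable (Pre_split_parameters expression operators) := by unfold Pre_split_parameters; infer_instance
def pvWitness_split_parameters : String × (List (String × String)) := ("a+b", [("+", "plus")])

def Spec_split_parameters (expression : String) (operators : List (String × String)) (out : Option String × String × String) : Prop := out = split_parameters_alt expression operators
instance (expression : String) (operators : List (String × String)) (out : Option String × String × String) : Decidable (Spec_split_parameters expression operators out) := by unfold Spec_split_parameters; infer_instance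

-- ===== CLAIM (what is proved, stated in full; the proofs are below) =====
def Claim_equal_split_parameters : Prop := ∀ (expression : String) (operators : List (String × String)), Dom_split_parameters expression operators → Pre_split_parameters expression operators → Spec_split_parameters expression operators (split_parameters expression operators)

-- ===== LEMMAS AND PROOFS =====

-- exactly-one-hit decomposition
theorem countP_one_decomp {α : Type} {p : α → Bool} : ∀ {L : List α},
    L.countP p = 1 → ∃ l c r, L = l ++ c :: r ∧ (∀ x ∈ l, ¬ p x) ∧ p c ∧ (∀ x ∈ r, ¬ p x) := by
  intro L
  induction L with
  | nil => simp
  | cons a L ih =>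
    intro h
    rw [List.countP_cons] at h
    by_cases hp : p a
    · refine ⟨[], a, L, rfl, by simp, hp, ?_⟩
      simp only [hp, if_pos] at h
      have : L.countP p = 0 := by omega
      exact fun x hx => by simpa using (List.countP_eq_zero.mp this) x hx
    · simp only [hp, Bool.false_eq_true, ite_false, add_zero] at h
      obtain ⟨l, c, r, hL, hl, hc, hr⟩ := ih h
      exact ⟨a :: l, c, r, by simp [hL], by simpa [hp] using hl, hc, hr⟩

-- A's fold passes unchanged over a block with no operator characters, growing the last bucket
theorem foldA_no_op {operators : List (String × String)} :
    ∀ (l : List Char), (∀ x ∈ l, ¬ operators.any (fun kv => kv.1 == String.ofList [x])) →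
    ∀ (op : Option String) (ps : List (List Char)) (last : List Char),
    l.foldl (fun (st : Option String × List (List Char)) ch =>
      if operators.any (fun kv => kv.1 == String.ofList [ch]) then
        (some (String.ofList [ch]), st.2 ++ [[]])
      else
        (st.1, st.2.dropLast ++ [st.2.getLastD [] ++ [ch]]))
      (op, ps ++ [last]) = (op, ps ++ [last ++ l]) := by
  intro l
  induction l with
  | nil => intro _ op ps last; simp
  | cons a l ih =>
    intro h op ps last
    have ha : ¬ operators.any (fun kv => kv.1 == String.ofList [a]) := h a (by simp)
    simp only [List.foldl_cons, if_neg ha, List.dropLast_concat, List.getLastD_concat]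
    have := ih (fun x hx => h x (by simp [hx])) op ps (last ++ [a])
    simpa using this

-- B's position list is empty over a block with no operator characters
theorem filter_no_op {operators : List (String × String)} (l : List Char)
    (h : ∀ x ∈ l, ¬ operators.any (fun kv => kv.1 == String.ofList [x])) (s : Int) :
    (PySem.List.enumerate l s).filter
      (fun p => operators.any (fun kv => kv.1 == String.ofList [p.2])) = [] := by
  rw [List.filter_eq_nil_iff]
  intro q hq
  obtain ⟨k, hk, rfl⟩ := (PySem.List.mem_enumerate_iff l s q).mp hq
  simpa using h _ (by simp)

-- value of A's port on the decomposed input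
theorem A_val (operators : List (String × String)) (expression : String)
    (l r : List Char) (c : Char) (hL : expression.toList = l ++ c :: r)
    (hl : ∀ x ∈ l, ¬ operators.any (fun kv => kv.1 == String.ofList [x]))
    (hc : operators.any (fun kv => kv.1 == String.ofList [c]))
    (hr : ∀ x ∈ r, ¬ operators.any (fun kv => kv.1 == String.ofList [x])) :
    split_parameters expression operators
      = (some (String.ofList [c]), String.ofList l, String.ofList r) := by
  unfold split_parameters
  rw [hL]
  have hA1 := foldA_no_op (operators := operators) l hl none [] []
  simp only [List.nil_append] at hA1
  have hA2 := foldA_no_op (operators := operators) r hr (some (String.ofList [c])) [l] []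
  simp only [List.foldl_append, List.foldl_cons, hA1, if_pos hc] at *
  simp only [hA2]
  simp

-- value of B's port on the decomposed input
theorem B_val (operators : List (String × String)) (expression : String)
    (l r : List Char) (c : Char) (hL : expression.toList = l ++ c :: r)
    (hl : ∀ x ∈ l, ¬ operators.any (fun kv => kv.1 == String.ofList [x]))
    (hc : operators.any (fun kv => kv.1 == String.ofList [c]))
    (hr : ∀ x ∈ r, ¬ operators.any (fun kv => kv.1 == String.ofList [x])) :
    split_parameters_alt expression operators
      = (some (String.ofList [c]), String.ofList l, String.ofList r) := by
  unfold split_parameters_alt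
  rw [hL]
  simp only [PySem.List.enumerate_append, PySem.List.enumerate_cons, List.filter_append,
    List.filter_cons, filter_no_op l hl, filter_no_op r hr, hc, if_pos, List.nil_append,
    List.map_cons, List.map_nil, zero_add]
  simp only [List.length_cons, List.length_nil, List.headD_cons]
  rw [if_pos trivial]
  rw [PySem.List.pyGet?_natCast, PySem.List.slice_to_natCast,
      show ((l.length : Int) + 1) = ((l.length + 1 : Nat) : Int) by push_cast; ring,
      PySem.List.slice_from_natCast]
  rw [show (l ++ c :: r) = (l ++ [c]) ++ r by simp]
  simp [List.take_left']

-- ===== VERDICT (by name: the statement is the Claim_ definition above) =====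
theorem split_parameters_spec : Claim_equal_split_parameters := by
  intro expression operators _ hpre
  unfold Spec_split_parameters
  obtain ⟨l, c, r, hL, hl, hc, hr⟩ := countP_one_decomp hpre
  rw [A_val operators expression l r c hL hl hc hr,
      B_val operators expression l r c hL hl hc hr]
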